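-- pv_equiv track=rewrite | github.com/rwkv-rs/rwkv-skills | src/eval/scheduler/dataset_utils.py | split_benchmark_and_split
-- ===== SOURCE A (Python) =====
-- DATASET_SLUG_ALIASES: dict[str, str] = {
--     "math500": "math_500_test",
--     "math": "hendrycks_math_test",
--     "input_data": "ifeval_test",
--     "ceval_exam_test": "ceval_test",
--     "mbpp": "mbpp_test",
--     "humanevalplus": "human_eval_plus_test",
--     "humaneval_plus": "human_eval_plus_test",
--     "human_eval+": "human_eval_plus_test",
--     "humanevalfix": "human_eval_fix_test",
--     "humaneval_cn": "human_eval_cn_test",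
--     "lcb": "livecodebench_test",
--     "mmmlu": "mmmlu_test",
--     "cmmlu": "cmmlu_test",
-- }
--
-- _KNOWN_SPLIT_NAMES = {
--     "train",
--     "test",
--     "validation",
--     "val",
--     "dev",
--     "devtest",
--     "main",
--     "science",
--     "verified",
--     "all",
--     "text",
--     # HLE category splits (data/hle/{math,cs,...}.jsonl) should keep the parent prefix.
--     "other",
--     "human",
--     "math",
--     "phy",
--     "cs",
--     "bio",
--     "chem",
--     "eng",
-- }
--
-- def safe_slug(text: str) -> str:
--     slug_chars: list[str] = []
--     for char in text:
--         if char.isalnum() or char in {".", "_"}: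
--             slug_chars.append(char)
--         else:
--             slug_chars.append("_")
--     return "".join(slug_chars).replace(".", "_")
--
-- def canonical_slug(text: str) -> str:
--     slug = safe_slug(text).lower()
--     return DATASET_SLUG_ALIASES.get(slug, slug)
--
-- def split_benchmark_and_split(dataset_slug: str) -> tuple[str, str]:
--     """Split a canonical dataset slug into (benchmark_name, dataset_split).
--
--     The split suffix is detected using the same `_KNOWN_SPLIT_NAMES` logic that
--     powers benchmark canonicalisation. If no known suffix is found, the split
--     is returned as an empty string.
--     """
--     slug = canonical_slug(dataset_slug)
--     # Artifact-only stems (e.g. results/.../xxx__cot.jsonl) may surface here; strip them.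
--     if slug.endswith("__cot"):
--         slug = slug[: -len("__cot")]
--     for split in sorted(_KNOWN_SPLIT_NAMES, key=len, reverse=True):
--         suffix = f"_{split}"
--         if slug.endswith(suffix):
--             return slug[: -len(suffix)], split
--     return slug, ""
-- ===== SOURCE B (Python) =====
-- DATASET_SLUG_ALIASES: dict[str, str] = {
--     "math500": "math_500_test",
--     "math": "hendrycks_math_test",
--     "input_data": "ifeval_test",
--     "ceval_exam_test": "ceval_test",
--     "mbpp": "mbpp_test",
--     "humanevalplus": "human_eval_plus_test",
--     "humaneval_plus": "human_eval_plus_test",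
--     "human_eval+": "human_eval_plus_test",
--     "humanevalfix": "human_eval_fix_test",
--     "humaneval_cn": "human_eval_cn_test",
--     "lcb": "livecodebench_test",
--     "mmmlu": "mmmlu_test",
--     "cmmlu": "cmmlu_test",
-- }
--
-- _KNOWN_SPLIT_NAMES = frozenset({
--     "train", "test", "validation", "val", "dev", "devtest", "main",
--     "science", "verified", "all", "text",
--     "other", "human", "math", "phy", "cs", "bio", "chem", "eng",
-- })
--
--
-- def split_benchmark_and_split(dataset_slug: str) -> tuple[str, str]:
--     """Split a canonical dataset slug into (benchmark_name, dataset_split)."""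
--     # Canonicalise in one pass: '.' would be slug-kept and then replaced by '_'
--     # anyway, so every non-alnum, non-underscore character maps straight to '_'.
--     slug = "".join(c if (c.isalnum() or c == "_") else "_" for c in dataset_slug).lower()
--     slug = DATASET_SLUG_ALIASES.get(slug, slug)
--     slug = slug.removesuffix("__cot")
--     # Each known split name is underscore-free, so a known suffix can only be
--     # the final '_'-separated segment: one rpartition replaces the suffix scan.
--     head, sep, tail = slug.rpartition("_")
--     if sep and tail in _KNOWN_SPLIT_NAMES:
--         return head, tail
--     return slug, ""
-- ===== Notes on version B (the rewrite author's own statement) =====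
-- stated objective: simpler
-- what changed: Replaces A's loop over the length-sorted known split names testing endswith of an underscore-prefixed candidate by a single rpartition on the last underscore plus one set-membership test (valid because every known split name is underscore-free), and fuses safe_slug's append-then-replace of dots into one per-character map.
import Mathlib
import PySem

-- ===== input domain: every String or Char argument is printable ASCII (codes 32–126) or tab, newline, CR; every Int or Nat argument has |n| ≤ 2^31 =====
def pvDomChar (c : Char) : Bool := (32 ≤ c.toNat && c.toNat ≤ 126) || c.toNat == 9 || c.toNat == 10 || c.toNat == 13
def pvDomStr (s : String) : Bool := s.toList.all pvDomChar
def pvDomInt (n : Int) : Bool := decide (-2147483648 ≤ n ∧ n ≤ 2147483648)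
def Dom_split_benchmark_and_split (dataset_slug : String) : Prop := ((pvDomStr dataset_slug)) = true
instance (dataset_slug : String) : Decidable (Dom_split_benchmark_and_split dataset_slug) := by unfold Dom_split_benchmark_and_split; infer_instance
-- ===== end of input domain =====

-- B replaces A's longest-first scan over the sorted split names by one rpartition on the
-- last '_' plus a set-membership test (objective: simpler); return values are identical.

-- ===== PORT A =====
-- module-level constants (both Python files carry the same literals)
def pvAliases : PySem.Dict (List Char) (List Char) := PySem.Dict.mk
  [ ("math500".toList, "math_500_test".toList)
  , ("math".toList, "hendrycks_math_test".toList)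
  , ("input_data".toList, "ifeval_test".toList)
  , ("ceval_exam_test".toList, "ceval_test".toList)
  , ("mbpp".toList, "mbpp_test".toList)
  , ("humanevalplus".toList, "human_eval_plus_test".toList)
  , ("humaneval_plus".toList, "human_eval_plus_test".toList)
  , ("human_eval+".toList, "human_eval_plus_test".toList)
  , ("humanevalfix".toList, "human_eval_fix_test".toList)
  , ("humaneval_cn".toList, "human_eval_cn_test".toList)
  , ("lcb".toList, "livecodebench_test".toList)
  , ("mmmlu".toList, "mmmlu_test".toList)
  , ("cmmlu".toList, "cmmlu_test".toList) ]

-- _KNOWN_SPLIT_NAMES (a Python set; its elements in source order)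
def pvKnownSplits : PySem.Set (List Char) := PySem.Set.ofList
  [ "train".toList, "test".toList, "validation".toList, "val".toList, "dev".toList
  , "devtest".toList, "main".toList, "science".toList, "verified".toList, "all".toList
  , "text".toList, "other".toList, "human".toList, "math".toList, "phy".toList
  , "cs".toList, "bio".toList, "chem".toList, "eng".toList ]

def pvCot : List Char := "__cot".toList

-- safe_slug: append char by char, join, then replace '.' with '_'
def pvSafeSlug (text : List Char) : List Char :=
  PySem.Chars.replace
    (text.foldl (fun acc c =>
      acc ++ [if PySem.Chars.isalnum c || (c == '.' || c == '_') then c else '_']) [])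
    ['.'] ['_']

-- canonical_slug
def pvCanonical (text : List Char) : List Char :=
  let slug := PySem.Chars.lower (pvSafeSlug text)
  pvAliases.getD slug slug

-- the 'for split in sorted(...)' loop of A
def pvFindSplitA : List (List Char) → List Char → List Char × List Char
  | [], slug => (slug, [])
  | split :: rest, slug =>
    let suffix := '_' :: split
    if PySem.Chars.endswith slug suffix then
      (PySem.List.slice slug none (some (-(suffix.length : Int))), split)
    else pvFindSplitA rest slug

def split_benchmark_and_split (dataset_slug : String) : String × String :=
  let slug0 := pvCanonical dataset_slug.toList
  let slug := if PySem.Chars.endswith slug0 pvCot then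
      PySem.List.slice slug0 none (some (-(pvCot.length : Int))) else slug0
  let r := pvFindSplitA (PySem.List.sorted pvKnownSplits (fun s => s.length) true) slug
  (String.ofList r.1, String.ofList r.2)

-- ===== PORT B =====
-- hand port of str.rpartition("_") (no PySem primitive; exact: scans for the LAST '_';
-- the middle Bool is 'separator found', i.e. Python's non-empty sep string)
def pvRPartitionU (s : List Char) : List Char × Bool × List Char :=
  let tail := (s.reverse.takeWhile (fun c => c != '_')).reverse
  if tail.length == s.length then ([], false, s)
  else (s.take (s.length - tail.length - 1), true, tail)

def split_benchmark_and_split_alt (dataset_slug : String) : String × String :=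
  let slug0 := PySem.Chars.lower
    (dataset_slug.toList.map (fun c => if PySem.Chars.isalnum c || c == '_' then c else '_'))
  let slug1 := pvAliases.getD slug0 slug0
  -- removesuffix("__cot")
  let slug := if PySem.Chars.endswith slug1 pvCot then slug1.take (slug1.length - 5) else slug1
  let r := pvRPartitionU slug
  if r.2.1 && PySem.Set.contains pvKnownSplits r.2.2 then
    (String.ofList r.1, String.ofList r.2.2)
  else (String.ofList slug, String.ofList [])

-- ===== PRECONDITION & SPEC =====
def Spec_split_benchmark_and_split (dataset_slug : String) (out : String × String) : Prop := out = split_benchmark_and_split_alt dataset_slug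
instance (dataset_slug : String) (out : String × String) : Decidable (Spec_split_benchmark_and_split dataset_slug out) := by unfold Spec_split_benchmark_and_split; infer_instance

-- ===== CLAIM (what is proved, stated in full; the proofs are below) =====
def Claim_equal_split_benchmark_and_split : Prop := ∀ (dataset_slug : String), Dom_split_benchmark_and_split dataset_slug → Spec_split_benchmark_and_split dataset_slug (split_benchmark_and_split dataset_slug)

-- ===== LEMMAS AND PROOFS =====

-- replace '.' '_' is a per-character map
lemma pv_replace_go_dot (fuel : Nat) (l acc : List Char) (h : l.length ≤ fuel) :
    PySem.Chars.replace.go ['.'] ['_'] fuel l acc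
      = acc.reverse ++ l.map (fun c => if c == '.' then '_' else c) := by
  induction fuel generalizing l acc with
  | zero =>
    have : l = [] := List.length_eq_zero_iff.mp (Nat.le_zero.mp h)
    subst this; simp [PySem.Chars.replace.go]
  | succ n ih =>
    cases l with
    | nil => simp [PySem.Chars.replace.go]
    | cons c t =>
      rw [PySem.Chars.replace.go]
      by_cases hc : c = '.'
      · subst hc
        simp only [List.isPrefixOf, BEq.rfl, Bool.and_true, if_pos]
        rw [ih _ _ (by simpa using Nat.le_of_succ_le_succ h)]
        simp
      · have : (['.'].isPrefixOf (c :: t)) = false := by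
          simp [List.isPrefixOf]; exact fun hcc => absurd hcc.symm hc
        rw [this]
        simp only [Bool.false_eq_true, if_false]
        rw [ih _ _ (by simpa using Nat.le_of_succ_le_succ h)]
        simp [hc]

-- A's safe_slug equals B's one-pass map
lemma pv_safeSlug_eq_map (text : List Char) :
    pvSafeSlug text
      = text.map (fun c => if PySem.Chars.isalnum c || c == '_' then c else '_') := by
  unfold pvSafeSlug
  rw [PySem.List.foldl_append_singleton_eq_map]
  simp only [List.nil_append, PySem.Chars.replace]
  rw [if_neg (by simp), pv_replace_go_dot _ _ _ (by simp)]
  simp only [List.reverse_nil, List.nil_append, List.map_map]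
  apply List.map_congr_left
  intro c _
  simp only [Function.comp_apply]
  by_cases hc : c = '.'
  · subst hc
    have : PySem.Chars.isalnum '.' = false := by decide
    simp [this]
  · have hne : (c == '.') = false := by simp [hc]
    by_cases h2 : (PySem.Chars.isalnum c || c == '_') = true
    · have h3 : (PySem.Chars.isalnum c || ((c == '.') || (c == '_'))) = true := by
        simp [hne] at h2 ⊢; tauto
      rw [if_pos h3, if_pos h2]
      simp [hne]
    · have h3 : ¬ ((PySem.Chars.isalnum c || ((c == '.') || (c == '_'))) = true) := by
        simp [hne] at h2 ⊢; tauto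
      rw [if_neg h3, if_neg h2]
      simp

-- slug[:-k] is take (len - k)
lemma pv_slice_neg (s : List Char) (k : Nat) (hk : 0 < k) :
    PySem.List.slice s none (some (-(k : Int))) = s.take (s.length - k) := by
  simp only [PySem.List.slice, PySem.List.clampIdx]
  rw [if_pos (by omega)]
  by_cases h : (s.length : Int) + -(k : Int) < 0
  · rw [if_pos h]; have : s.length - k = 0 := by omega
    simp [this]
  · rw [if_neg h]
    have : ((s.length : Int) + -(k : Int)).toNat = s.length - k := by omega
    simp [this]

-- endswith with an underscore-free suffix picks out exactly the last segment
lemma pv_endswith_iff (h t sp : List Char) (ht : '_' ∉ t) (hsp : '_' ∉ sp) :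
    PySem.Chars.endswith (h ++ '_' :: t) ('_' :: sp) = true ↔ sp = t := by
  rw [PySem.Chars.endswith_iff]
  constructor
  · intro hsuf
    have htsuf : ('_' :: t) <:+ (h ++ '_' :: t) := List.suffix_append h _
    rcases List.suffix_or_suffix_of_suffix hsuf htsuf with hc | hc
    · rcases List.suffix_cons_iff.mp hc with he | he
      · exact (List.cons.injEq _ _ _ _ ▸ he).2 ▸ rfl
      · exact absurd (he.subset (List.mem_cons_self)) ht
    · rcases List.suffix_cons_iff.mp hc with he | he
      · exact (((List.cons.injEq _ _ _ _).mp he).2).symm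
      · exact absurd (he.subset (List.mem_cons_self)) hsp
  · rintro rfl; exact List.suffix_append h _

-- A's loop when no suffix matches
lemma pv_findA_none (l : List (List Char)) (slug : List Char)
    (h : ∀ sp ∈ l, PySem.Chars.endswith slug ('_' :: sp) = false) :
    pvFindSplitA l slug = (slug, []) := by
  induction l with
  | nil => rfl
  | cons sp rest ih =>
    simp only [pvFindSplitA]
    rw [h sp List.mem_cons_self]
    simp only [Bool.false_eq_true, if_false]
    exact ih fun s hs => h s (List.mem_cons_of_mem _ hs)

-- A's loop on a slug with a last segment
lemma pv_findA_seg (l : List (List Char)) (h t : List Char) (ht : '_' ∉ t)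
    (hl : ∀ sp ∈ l, '_' ∉ sp) :
    pvFindSplitA l (h ++ '_' :: t)
      = if t ∈ l then (h, t) else (h ++ '_' :: t, []) := by
  induction l with
  | nil => rfl
  | cons sp rest ih =>
    simp only [pvFindSplitA]
    by_cases he : sp = t
    · rw [if_pos ((pv_endswith_iff h t sp ht (hl sp List.mem_cons_self)).mpr he)]
      rw [if_pos (List.mem_cons.mpr (Or.inl he.symm))]
      have hlen : (h ++ '_' :: t).length - (('_' :: sp).length) = h.length := by
        simp [he]
      rw [pv_slice_neg _ _ (by simp), hlen,
        show (h ++ '_' :: t).take h.length = h from List.take_left .., he]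
    · have hf : PySem.Chars.endswith (h ++ '_' :: t) ('_' :: sp) = false := by
        rw [Bool.eq_false_iff]
        intro hc
        exact he ((pv_endswith_iff h t sp ht (hl sp List.mem_cons_self)).mp hc)
      rw [hf]
      simp only [Bool.false_eq_true, if_false]
      rw [ih fun s hs => hl s (List.mem_cons_of_mem _ hs)]
      by_cases hm : t ∈ rest
      · rw [if_pos hm, if_pos (List.mem_cons_of_mem _ hm)]
      · rw [if_neg hm, if_neg (fun hc =>
          (List.mem_cons.mp hc).elim (fun hh => he hh.symm) hm)]

-- rpartition on a slug with a last segment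
lemma pv_rpart_seg (h t : List Char) (ht : '_' ∉ t) :
    pvRPartitionU (h ++ '_' :: t) = (h, true, t) := by
  unfold pvRPartitionU
  have hrev : (h ++ '_' :: t).reverse = t.reverse ++ '_' :: h.reverse := by simp
  have htw : (h ++ '_' :: t).reverse.takeWhile (fun c => c != '_') = t.reverse := by
    rw [hrev, List.takeWhile_append]
    rw [if_pos]
    · simp [List.takeWhile]
    · rw [List.takeWhile_eq_self_iff.mpr]
      intro x hx
      simp only [bne_iff_ne, ne_eq]
      exact fun hc => ht (hc ▸ List.mem_reverse.mp hx)
  rw [htw]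
  simp only [List.reverse_reverse]
  rw [if_neg (by simp; omega)]
  have hlen : (h ++ '_' :: t).length - t.length - 1 = h.length := by simp; omega
  rw [hlen, show (h ++ '_' :: t).take h.length = h from List.take_left ..]

-- rpartition when there is no underscore
lemma pv_rpart_none (slug : List Char) (h : '_' ∉ slug) :
    pvRPartitionU slug = ([], false, slug) := by
  unfold pvRPartitionU
  rw [List.takeWhile_eq_self_iff.mpr (by
    intro x hx
    simp only [bne_iff_ne, ne_eq]
    exact fun hc => h (hc ▸ List.mem_reverse.mp hx))]
  simp

-- a list containing '_' splits at its LAST '_'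
lemma pv_exists_last (slug : List Char) (h : '_' ∈ slug) :
    ∃ hd t, slug = hd ++ '_' :: t ∧ '_' ∉ t := by
  induction slug using List.reverseRecOn with
  | nil => cases h
  | append_singleton xs x ih =>
    by_cases hx : x = '_'
    · exact ⟨xs, [], by simp [hx], by simp⟩
    · have : '_' ∈ xs := by
        rcases List.mem_append.mp h with h1 | h1
        · exact h1
        · simp only [List.mem_singleton] at h1; exact absurd h1.symm hx
      rcases ih this with ⟨hd, t, he, hnt⟩
      exact ⟨hd, t ++ [x], by simp [he], by
        intro hc
        rcases List.mem_append.mp hc with h1 | h1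
        · exact hnt h1
        · simp only [List.mem_singleton] at h1; exact hx h1.symm⟩

-- every known split name is underscore-free
lemma pv_splits_free : ∀ sp ∈ (pvKnownSplits : List (List Char)), '_' ∉ sp := by decide

-- the loop over the sorted split names equals the rpartition test
lemma pv_core (slug : List Char) :
    pvFindSplitA (PySem.List.sorted pvKnownSplits (fun s => s.length) true) slug
      = (let r := pvRPartitionU slug;
         if r.2.1 && PySem.Set.contains pvKnownSplits r.2.2 then (r.1, r.2.2)
         else (slug, [])) := by
  have hperm := PySem.List.sorted_perm (pvKnownSplits : List (List Char)) (fun s => s.length) true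
  have hfree : ∀ sp ∈ PySem.List.sorted pvKnownSplits (fun s => s.length) true, '_' ∉ sp :=
    fun sp hs => pv_splits_free sp (hperm.mem_iff.mp hs)
  by_cases hu : '_' ∈ slug
  · rcases pv_exists_last slug hu with ⟨hd, t, rfl, hnt⟩
    rw [pv_findA_seg _ _ _ hnt hfree, pv_rpart_seg _ _ hnt]
    simp only [Bool.true_and]
    have hmem : (t ∈ PySem.List.sorted pvKnownSplits (fun s => s.length) true)
        ↔ t ∈ (pvKnownSplits : List (List Char)) := hperm.mem_iff
    cases hc : PySem.Set.contains pvKnownSplits t with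
    | true =>
      rw [if_pos (hmem.mpr (by simpa using hc))]
      simp
    | false =>
      rw [if_neg (fun hm => by simp [hmem.mp hm] at hc)]
      simp
  · rw [pv_findA_none _ _ (fun sp hs => by
      rw [Bool.eq_false_iff]
      intro hc
      exact hu (((PySem.Chars.endswith_iff _ _).mp hc).subset List.mem_cons_self)),
      pv_rpart_none _ hu]
    simp

-- the canonicalised, cot-stripped slugs of the two ports coincide
lemma pv_slug_eq (dataset_slug : String) :
    (if PySem.Chars.endswith (pvCanonical dataset_slug.toList) pvCot then
       PySem.List.slice (pvCanonical dataset_slug.toList) none (some (-(pvCot.length : Int)))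
     else pvCanonical dataset_slug.toList)
    = (if PySem.Chars.endswith
          (pvAliases.getD
            (PySem.Chars.lower (dataset_slug.toList.map
              (fun c => if PySem.Chars.isalnum c || c == '_' then c else '_')))
            (PySem.Chars.lower (dataset_slug.toList.map
              (fun c => if PySem.Chars.isalnum c || c == '_' then c else '_')))) pvCot then
        (pvAliases.getD
            (PySem.Chars.lower (dataset_slug.toList.map
              (fun c => if PySem.Chars.isalnum c || c == '_' then c else '_')))
            (PySem.Chars.lower (dataset_slug.toList.map
              (fun c => if PySem.Chars.isalnum c || c == '_' then c else '_')))).take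
          ((pvAliases.getD
            (PySem.Chars.lower (dataset_slug.toList.map
              (fun c => if PySem.Chars.isalnum c || c == '_' then c else '_')))
            (PySem.Chars.lower (dataset_slug.toList.map
              (fun c => if PySem.Chars.isalnum c || c == '_' then c else '_')))).length - 5)
      else pvAliases.getD
            (PySem.Chars.lower (dataset_slug.toList.map
              (fun c => if PySem.Chars.isalnum c || c == '_' then c else '_')))
            (PySem.Chars.lower (dataset_slug.toList.map
              (fun c => if PySem.Chars.isalnum c || c == '_' then c else '_')))) := by
  have hcanon : pvCanonical dataset_slug.toList
      = pvAliases.getD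
          (PySem.Chars.lower (dataset_slug.toList.map
            (fun c => if PySem.Chars.isalnum c || c == '_' then c else '_')))
          (PySem.Chars.lower (dataset_slug.toList.map
            (fun c => if PySem.Chars.isalnum c || c == '_' then c else '_'))) := by
    unfold pvCanonical
    rw [pv_safeSlug_eq_map]
  rw [hcanon]
  have hk : (pvCot.length : Int) = (((5 : Nat) : Int)) := by decide
  rw [hk, pv_slice_neg _ _ (by omega)]

-- ===== VERDICT (by name: the statement is the Claim_ definition above) =====
theorem split_benchmark_and_split_spec : Claim_equal_split_benchmark_and_split := by
  intro dataset_slug _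
  unfold Spec_split_benchmark_and_split
  unfold split_benchmark_and_split split_benchmark_and_split_alt
  simp only [pv_core, ← pv_slug_eq dataset_slug]
  set slug := (if PySem.Chars.endswith (pvCanonical dataset_slug.toList) pvCot then
       PySem.List.slice (pvCanonical dataset_slug.toList) none (some (-(pvCot.length : Int)))
     else pvCanonical dataset_slug.toList) with hs
  by_cases hb : (pvRPartitionU slug).2.1 = true ∧ (pvRPartitionU slug).2.2 ∈ pvKnownSplits
  · simp [hb]
  · simp [hb]
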